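-- pv_equiv track=rewrite | github.com/nikolakulikova/pokus | DockerChecker.py | _check_cache
-- ===== SOURCE A (Python) =====
-- def _check_cache(val: list) -> bool:
--     was_required = False
--     for option in val:
--         if "=" not in option:
--             return False
--         option = option.split("=")
--         op = option[0].strip()
--         value = option[1].strip()
--         if op in ["target", "id", "from", "source"]:
--             if op == "target":
--                 was_required = True
--             if value == "":
--                 return False
--         elif op in ["mode", "uid", "gid"]:
--             if not value.isnumeric():
--                 return False
--         elif op in ["ro", "readonly"]:
--             if value != "":
--                 return False
--         elif op == "sharing":
--             if value not in ["shared", "private","locked"]: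
--                 return False
--     if not was_required:
--         return False
--     return True
-- ===== SOURCE B (Python) =====
-- def _valid_option(option: str) -> bool:
--     if "=" not in option:
--         return False
--     parts = option.split("=")
--     op = parts[0].strip()
--     value = parts[1].strip()
--     if op in ("target", "id", "from", "source"):
--         return value != ""
--     if op in ("mode", "uid", "gid"):
--         return value.isnumeric()
--     if op in ("ro", "readonly"):
--         return value == ""
--     if op == "sharing":
--         return value in ("shared", "private", "locked")
--     return True
--
--
-- def _is_target(option: str) -> bool:
--     return "=" in option and option.split("=")[0].strip() == "target"
--
--
-- def _check_cache(val: list) -> bool: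
--     return all(_valid_option(o) for o in val) and any(_is_target(o) for o in val)
-- ===== Notes on version B (the rewrite author's own statement) =====
-- stated objective: simpler
-- what changed: Replaces the stateful loop with a was_required flag and in-loop early returns by two independent quantifier passes: all options valid AND some option has key 'target'.
import Mathlib
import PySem

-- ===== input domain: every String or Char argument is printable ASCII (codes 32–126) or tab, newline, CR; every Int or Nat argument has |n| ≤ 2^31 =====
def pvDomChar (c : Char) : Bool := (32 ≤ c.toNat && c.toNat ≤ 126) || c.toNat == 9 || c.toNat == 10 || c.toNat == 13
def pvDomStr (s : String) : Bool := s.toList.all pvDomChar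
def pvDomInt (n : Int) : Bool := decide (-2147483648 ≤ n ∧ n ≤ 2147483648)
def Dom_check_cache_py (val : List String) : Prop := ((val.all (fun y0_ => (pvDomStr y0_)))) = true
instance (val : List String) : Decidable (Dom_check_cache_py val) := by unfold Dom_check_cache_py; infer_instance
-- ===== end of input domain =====

-- B replaces A's stateful loop (was_required flag + in-loop early returns) by two independent
-- quantifier passes: every option valid AND some option has key 'target' (objective: simpler).


-- ===== PORT A =====
-- value.isnumeric() is ported as PySem.Str.strIsdigit: on the printable-ASCII domain
-- isnumeric and isdigit coincide (both are true exactly on nonempty strings of '0'..'9').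
def checkCacheLoopA (was_required : Bool) : List String → Bool
  | [] => was_required          -- 'if not was_required: return False; return True'
  | option :: rest =>
    if PySem.Str.isIn "=" option = false then false
    else
      let parts := (PySem.Str.split? option "=").getD []
      let op := PySem.Str.strip (parts.getD 0 "")
      let value := PySem.Str.strip (parts.getD 1 "")
      if op = "target" ∨ op = "id" ∨ op = "from" ∨ op = "source" then
        let was_required := if op = "target" then true else was_required
        if value = "" then false else checkCacheLoopA was_required rest
      else if op = "mode" ∨ op = "uid" ∨ op = "gid" then
        if PySem.Str.strIsdigit value = false then false else checkCacheLoopA was_required rest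
      else if op = "ro" ∨ op = "readonly" then
        if value ≠ "" then false else checkCacheLoopA was_required rest
      else if op = "sharing" then
        if ¬ (value = "shared" ∨ value = "private" ∨ value = "locked") then false
        else checkCacheLoopA was_required rest
      else checkCacheLoopA was_required rest

def check_cache_py (val : List String) : Bool := checkCacheLoopA false val

-- ===== PORT B =====
def validOption (option : String) : Bool :=
  if PySem.Str.isIn "=" option = false then false
  else
    let parts := (PySem.Str.split? option "=").getD []
    let op := PySem.Str.strip (parts.getD 0 "")
    let value := PySem.Str.strip (parts.getD 1 "")
    if op = "target" ∨ op = "id" ∨ op = "from" ∨ op = "source" then value ≠ ""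
    else if op = "mode" ∨ op = "uid" ∨ op = "gid" then PySem.Str.strIsdigit value
    else if op = "ro" ∨ op = "readonly" then value = ""
    else if op = "sharing" then decide (value = "shared" ∨ value = "private" ∨ value = "locked")
    else true

def isTargetOption (option : String) : Bool :=
  PySem.Str.isIn "=" option
    && PySem.Str.strip (((PySem.Str.split? option "=").getD []).getD 0 "") = "target"

def check_cache_py_alt (val : List String) : Bool :=
  val.all validOption && val.any isTargetOption

-- ===== PRECONDITION & SPEC =====
def Spec_check_cache_py (val : List String) (out : Bool) : Prop := out = check_cache_py_alt val
instance (val : List String) (out : Bool) : Decidable (Spec_check_cache_py val out) := by unfold Spec_check_cache_py; infer_instance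

-- ===== CLAIM (what is proved, stated in full; the proofs are below) =====
def Claim_equal_check_cache_py : Prop := ∀ (val : List String), Dom_check_cache_py val → Spec_check_cache_py val (check_cache_py val)

-- ===== LEMMAS AND PROOFS =====
-- One step of A's loop: if the option is invalid the loop returns False, otherwise it
-- continues with the flag OR-ed with 'this option's key is target'.
theorem checkCacheLoopA_step (b : Bool) (o : String) (rest : List String) :
    checkCacheLoopA b (o :: rest)
      = if validOption o = true then checkCacheLoopA (b || isTargetOption o) rest else false := by
  by_cases h1 : PySem.Str.isIn "=" o = false
  · have h1c : PySem.Chars.isIn ['='] o.toList = false := by simpa using h1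
    simp [checkCacheLoopA, validOption, h1c]
  · have h1' : PySem.Str.isIn "=" o = true := by
      cases h : PySem.Str.isIn "=" o
      · exact absurd h h1
      · rfl
    simp only [checkCacheLoopA, validOption, isTargetOption, h1', if_neg h1, Bool.true_and]
    set op := PySem.Str.strip (((PySem.Str.split? o "=").getD []).getD 0 "") with hop
    set value := PySem.Str.strip (((PySem.Str.split? o "=").getD []).getD 1 "") with hvv
    by_cases e1 : op = "target"
    · by_cases h3 : value = "" <;> simp [e1, h3, Bool.and_assoc]
    · by_cases e2 : op = "id"
      · by_cases h3 : value = "" <;> simp [e1, e2, h3, Bool.and_assoc]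
      · by_cases e3 : op = "from"
        · by_cases h3 : value = "" <;> simp [e1, e2, e3, h3, Bool.and_assoc]
        · by_cases e4 : op = "source"
          · by_cases h3 : value = "" <;> simp [e1, e2, e3, e4, h3, Bool.and_assoc]
          · by_cases e5 : op = "mode"
            · cases h6 : PySem.Chars.strIsdigit value.toList <;>
                simp [e1, e2, e3, e4, e5, h6, Bool.and_assoc]
            · by_cases e6 : op = "uid"
              · cases h6 : PySem.Chars.strIsdigit value.toList <;>
                  simp [e1, e2, e3, e4, e5, e6, h6, Bool.and_assoc]
              · by_cases e7 : op = "gid"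
                · cases h6 : PySem.Chars.strIsdigit value.toList <;>
                    simp [e1, e2, e3, e4, e5, e6, e7, h6, Bool.and_assoc]
                · by_cases e8 : op = "ro"
                  · by_cases h8 : value = "" <;>
                      simp [e1, e2, e3, e4, e5, e6, e7, e8, h8, Bool.and_assoc]
                  · by_cases e9 : op = "readonly"
                    · by_cases h8 : value = "" <;>
                        simp [e1, e2, e3, e4, e5, e6, e7, e8, e9, h8, Bool.and_assoc]
                    · by_cases e10 : op = "sharing"
                      · by_cases hs : value = "shared" <;> by_cases hp : value = "private" <;>
                          by_cases hl : value = "locked" <;>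
                          simp [e1, e2, e3, e4, e5, e6, e7, e8, e9, e10, hs, hp, hl, Bool.and_assoc]
                      · simp [e1, e2, e3, e4, e5, e6, e7, e8, e9, e10, Bool.and_assoc]

-- Loop invariant: A's loop returns (all options valid) && (flag so far || some option is target).
theorem checkCacheLoopA_eq (was : Bool) (l : List String) :
    checkCacheLoopA was l = (l.all validOption && (was || l.any isTargetOption)) := by
  induction l generalizing was with
  | nil => simp [checkCacheLoopA]
  | cons o rest ih =>
    rw [checkCacheLoopA_step]
    by_cases hv : validOption o = true
    · simp [hv, ih, Bool.or_assoc]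
    · simp [hv]

-- ===== VERDICT (by name: the statement is the Claim_ definition above) =====
theorem check_cache_py_spec : Claim_equal_check_cache_py := by
  intro val _
  show check_cache_py val = check_cache_py_alt val
  simp [check_cache_py, check_cache_py_alt, checkCacheLoopA_eq]
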